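-- pv_equiv track=rewrite | github.com/lerkarocknroll/Tests | ssdtest.py | solve
-- ===== SOURCE A (Python) =====
-- def solve(models: list, available: list, manufacturers: list):
--     repair_count = 0
--     ssds = []
--     for model, avail in zip(models, available):
--         if avail == 1:
--             if any(manuf in model for manuf in manufacturers):
--                 ssds.append(model)
--                 repair_count += 1
--     return ssds, repair_count
-- ===== SOURCE B (Python) =====
-- def solve(models: list, available: list, manufacturers: list):
--     # manufacturer-major worklist: start from the available models only; each
--     # manufacturer pass scans the models not matched so far, moving matched
--     # indices into `hits` and shrinking the worklist; a final indexed pass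
--     # collects the available matched models in their original order.
--     hits = set()
--     pending = [(i, m) for i, (m, a) in enumerate(zip(models, available)) if a == 1]
--     for f in manufacturers:
--         if not pending:
--             break
--         still = []
--         for i, m in pending:
--             if f in m:
--                 hits.add(i)
--             else:
--                 still.append((i, m))
--         pending = still
--     ssds = []
--     repair_count = 0
--     for i, model in enumerate(models):
--         if i in hits:
--             ssds.append(model)
--             repair_count += 1
--     return ssds, repair_count
-- ===== Notes on version B (the rewrite author's own statement) =====
-- stated objective: alternative
-- what changed: B inverts the loop nesting: instead of A's per-model scan over all manufacturers, it keeps a manufacturer-major worklist of the still-unmatched available (index, model) pairs that shrinks pass by pass while matched indices go into a set, then a final indexed pass over the models collects the matched ones in order.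
import Mathlib
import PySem

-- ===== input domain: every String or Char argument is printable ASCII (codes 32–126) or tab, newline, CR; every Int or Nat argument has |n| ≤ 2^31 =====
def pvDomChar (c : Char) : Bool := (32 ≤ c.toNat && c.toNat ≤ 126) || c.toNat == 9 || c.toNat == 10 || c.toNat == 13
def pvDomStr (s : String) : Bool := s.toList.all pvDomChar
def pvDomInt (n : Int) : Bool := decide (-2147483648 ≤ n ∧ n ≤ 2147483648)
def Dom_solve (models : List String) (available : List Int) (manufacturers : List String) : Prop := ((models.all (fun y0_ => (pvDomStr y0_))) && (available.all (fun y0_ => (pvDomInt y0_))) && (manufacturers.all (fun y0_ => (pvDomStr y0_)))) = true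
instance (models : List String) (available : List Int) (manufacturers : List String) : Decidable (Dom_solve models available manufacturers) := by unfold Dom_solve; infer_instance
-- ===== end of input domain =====

-- B inverts the loop nesting: a manufacturer-major worklist of still-unmatched
-- available models shrinks pass by pass while matched indices go into a set;
-- a final indexed pass collects the result (alternative; same asymptotic cost).

-- ===== PORT A =====
-- loop: for (model, avail) in zip(models, available), state = (ssds, repair_count)
def solve (models : List String) (available : List Int) (manufacturers : List String) : List String × Int :=
  (models.zip available).foldl
    (fun st p =>
      if p.2 == 1 then
        if manufacturers.any (fun manuf => PySem.Str.isIn manuf p.1) then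
          (st.1 ++ [p.1], st.2 + 1)
        else st
      else st)
    ([], 0)

-- ===== PORT B =====
-- pending = [(i, m) for i, (m, a) in enumerate(zip(models, available)) if a == 1]
def pvPending (models : List String) (available : List Int) : List (Int × String) :=
  ((PySem.List.enumerate (models.zip available)).filter (fun q => q.2.2 == 1)).map
    (fun q => (q.1, q.2.1))

-- one manufacturer pass: 'if not pending: break' ports as the no-op step it is;
-- the inner loop over pending fills (hits, still) and the new pending is still
def pvPass (f : String) (st : PySem.Set Int × List (Int × String)) :
    PySem.Set Int × List (Int × String) :=
  if st.2.isEmpty then st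
  else st.2.foldl
    (fun q im =>
      if PySem.Str.isIn f im.2 then (PySem.Set.add q.1 im.1, q.2)
      else (q.1, q.2 ++ [im]))
    (st.1, [])

-- hits after the manufacturer loop
def pvHits (models : List String) (available : List Int) (manufacturers : List String) :
    PySem.Set Int :=
  (manufacturers.foldl (fun st f => pvPass f st)
    (PySem.Set.empty, pvPending models available)).1

-- final loop: for i, model in enumerate(models): if i in hits: append, count
def solve_alt (models : List String) (available : List Int) (manufacturers : List String) : List String × Int :=
  (PySem.List.enumerate models).foldl
    (fun out p =>
      if PySem.Set.contains (pvHits models available manufacturers) p.1 then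
        (out.1 ++ [p.2], out.2 + 1)
      else out)
    ([], 0)

-- ===== PRECONDITION & SPEC =====
def Spec_solve (models : List String) (available : List Int) (manufacturers : List String) (out : List String × Int) : Prop := out = solve_alt models available manufacturers
instance (models : List String) (available : List Int) (manufacturers : List String) (out : List String × Int) : Decidable (Spec_solve models available manufacturers out) := by unfold Spec_solve; infer_instance

-- ===== CLAIM (what is proved, stated in full; the proofs are below) =====
def Claim_equal_solve : Prop := ∀ (models : List String) (available : List Int) (manufacturers : List String), Dom_solve models available manufacturers → Spec_solve models available manufacturers (solve models available manufacturers)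

-- ===== LEMMAS AND PROOFS =====

-- A's loop from an arbitrary state appends the filtered models and adds their number.
theorem solve_fold_inv (manufacturers : List String) (l : List (String × Int))
    (acc : List String) (c : Int) :
    l.foldl
      (fun st p =>
        if p.2 == 1 then
          if manufacturers.any (fun manuf => PySem.Str.isIn manuf p.1) then
            (st.1 ++ [p.1], st.2 + 1)
          else st
        else st)
      (acc, c)
    = (acc ++ (l.filter
        (fun p => p.2 == 1 && manufacturers.any (fun f => PySem.Str.isIn f p.1))).map Prod.fst,
       c + ((l.filter
        (fun p => p.2 == 1 && manufacturers.any (fun f => PySem.Str.isIn f p.1))).map Prod.fst).length) := by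
  induction l generalizing acc c with
  | nil => simp
  | cons hd t ih =>
    simp only [List.foldl_cons, List.filter_cons]
    by_cases h1 : (hd.2 == 1) = true
    · by_cases h2 : (manufacturers.any (fun f => PySem.Str.isIn f hd.1)) = true
      · simp only [h1, h2, Bool.and_self, if_true]
        rw [ih]
        simp only [List.map_cons, List.length_cons, List.append_assoc, List.singleton_append]
        rw [Prod.mk.injEq]
        exact ⟨rfl, by push_cast; ring⟩
      · simp only [h1, h2, Bool.true_and, if_true]
        exact ih acc c
    · simp only [h1, Bool.false_and]
      exact ih acc c

-- one pass's inner loop: matched indices are added, unmatched pairs appended to still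
theorem pass_inner_inv (f : String) (p : List (Int × String))
    (h : PySem.Set Int) (acc : List (Int × String)) :
    p.foldl
      (fun q im =>
        if PySem.Str.isIn f im.2 then (PySem.Set.add q.1 im.1, q.2)
        else (q.1, q.2 ++ [im]))
      (h, acc)
    = ((p.filter (fun im => PySem.Str.isIn f im.2)).foldl
         (fun s im => PySem.Set.add s im.1) h,
       acc ++ p.filter (fun im => !PySem.Str.isIn f im.2)) := by
  induction p generalizing h acc with
  | nil => simp
  | cons b t ih =>
    simp only [List.foldl_cons, List.filter_cons]
    by_cases hb : (PySem.Str.isIn f b.2) = true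
    · simp only [hb, if_true, Bool.not_true, List.foldl_cons]
      exact ih _ _
    · simp only [hb, Bool.false_eq_true, if_false, Bool.not_false, if_true]
      rw [ih]
      simp [List.append_assoc]

-- the manufacturer loop: pending shrinks to the never-matched pairs, and an index
-- is in hits iff it was in hits or some pending pair's model matches a manufacturer
theorem pass_fold_inv (l : List String) :
    ∀ (h : PySem.Set Int) (p : List (Int × String)),
      ((l.foldl (fun st f => pvPass f st) (h, p)).2
          = p.filter (fun b => !(l.any (fun f => PySem.Str.isIn f b.2))))
      ∧ (∀ i : Int, i ∈ (l.foldl (fun st f => pvPass f st) (h, p)).1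
          ↔ i ∈ h ∨ ∃ b ∈ p, b.1 = i ∧ l.any (fun f => PySem.Str.isIn f b.2) = true) := by
  induction l with
  | nil =>
    intro h p
    constructor
    · simp
    · intro i; simp
  | cons f t ih =>
    intro h p
    rw [List.foldl_cons]
    by_cases hp : p.isEmpty = true
    · have hpe : p = [] := List.isEmpty_iff.mp hp
      subst hpe
      have hstep : pvPass f ((h : PySem.Set Int), ([] : List (Int × String))) = (h, []) := by
        simp [pvPass]
      rw [hstep]
      rcases ih h [] with ⟨h1, h2⟩
      exact ⟨by rw [h1]; simp, fun i => by rw [h2]; simp⟩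
    · have hstep : pvPass f (h, p)
          = ((p.filter (fun im => PySem.Str.isIn f im.2)).foldl
               (fun s im => PySem.Set.add s im.1) h,
             p.filter (fun im => !PySem.Str.isIn f im.2)) := by
        unfold pvPass
        rw [if_neg hp, pass_inner_inv]
        simp
      rw [hstep]
      rcases ih ((p.filter (fun im => PySem.Str.isIn f im.2)).foldl
          (fun s im => PySem.Set.add s im.1) h)
        (p.filter (fun im => !PySem.Str.isIn f im.2)) with ⟨h1, h2⟩
      constructor
      · rw [h1, List.filter_filter]
        apply List.filter_congr
        intro b _
        simp [List.any_cons, Bool.not_or, Bool.and_comm]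
      · intro i
        rw [h2, PySem.Set.mem_foldl_add]
        simp only [List.mem_filter, List.any_cons, Bool.not_eq_true',
          Bool.or_eq_true]
        constructor
        · rintro (((hih | ⟨b, ⟨hbp, hbf⟩, rfl⟩) ) | ⟨b, ⟨hbp, hbf⟩, hbi, hbt⟩)
          · exact Or.inl hih
          · exact Or.inr ⟨b, hbp, rfl, Or.inl hbf⟩
          · exact Or.inr ⟨b, hbp, hbi, Or.inr hbt⟩
        · rintro (hih | ⟨b, hbp, hbi, (hbf | hbt)⟩)
          · exact Or.inl (Or.inl hih)
          · exact Or.inl (Or.inr ⟨b, ⟨hbp, hbf⟩, hbi.symm⟩)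
          · by_cases hbf : (PySem.Str.isIn f b.2) = true
            · exact Or.inl (Or.inr ⟨b, ⟨hbp, hbf⟩, hbi.symm⟩)
            · exact Or.inr ⟨b, ⟨hbp, Bool.not_eq_true _ ▸ hbf⟩, hbi, hbt⟩

-- membership in hits, characterised over the zipped input
theorem hits_iff (models : List String) (available : List Int) (manufacturers : List String)
    (i : Int) :
    i ∈ pvHits models available manufacturers
      ↔ ∃ (k : Nat) (hk : k < (models.zip available).length),
          i = (k : Int) ∧ ((models.zip available)[k].2 == 1) = true
          ∧ manufacturers.any (fun f => PySem.Str.isIn f (models.zip available)[k].1) = true := by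
  unfold pvHits
  rw [(pass_fold_inv manufacturers PySem.Set.empty (pvPending models available)).2 i]
  unfold pvPending
  simp only [PySem.Set.empty, List.not_mem_nil, false_or, List.mem_map,
    List.mem_filter, PySem.List.mem_enumerate_iff]
  constructor
  · rintro ⟨b, ⟨q, ⟨⟨k, hk, rfl⟩, hq1⟩, rfl⟩, rfl, hany⟩
    exact ⟨k, hk, by simp, hq1, hany⟩
  · rintro ⟨k, hk, rfl, h1, hany⟩
    exact ⟨((k : Int), (models.zip available)[k].1),
      ⟨((k : Int) + 0 - 0, (models.zip available)[k]), ⟨⟨k, hk, by simp⟩, by simpa using h1⟩, by simp⟩,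
      rfl, hany⟩

-- B's final loop from an arbitrary state
theorem final_fold_inv (P : Int → Bool) (e : List (Int × String))
    (acc : List String) (c : Int) :
    e.foldl (fun out p => if P p.1 then (out.1 ++ [p.2], out.2 + 1) else out) (acc, c)
    = (acc ++ (e.filter (fun p => P p.1)).map (fun p => p.2),
       c + ((e.filter (fun p => P p.1)).map (fun p => p.2)).length) := by
  induction e generalizing acc c with
  | nil => simp
  | cons hd t ih =>
    simp only [List.foldl_cons, List.filter_cons]
    by_cases h : (P hd.1) = true
    · simp only [h, if_true]
      rw [ih]
      simp only [List.map_cons, List.length_cons, List.append_assoc, List.singleton_append]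
      rw [Prod.mk.injEq]
      exact ⟨rfl, by push_cast; ring⟩
    · simp only [h]
      exact ih acc c

-- an enumerate-filter whose predicate is false on every reachable index is empty
theorem enum_filter_nil (P : Int → Bool) :
    ∀ (xs : List String) (s : Int), (∀ k : Nat, P (s + k) = false) →
      ((PySem.List.enumerate xs s).filter (fun p => P p.1)) = [] := by
  intro xs
  induction xs with
  | nil => intro s _; simp [PySem.List.enumerate_nil]
  | cons x t ih =>
    intro s hP
    rw [PySem.List.enumerate_cons, List.filter_cons]
    have h0 : P s = false := by simpa using hP 0
    simp only [h0, Bool.false_eq_true, if_false]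
    apply ih
    intro k
    have := hP (k + 1)
    rw [show s + ((k : Nat) + 1 : Nat) = (s + 1) + (k : Nat) by push_cast; ring] at this
    exact this

-- the filtered enumerate over models equals A's filtered zip, given the
-- pointwise description of the predicate on indices
theorem final_shape (g : String → Bool) (P : Int → Bool) :
    ∀ (models : List String) (available : List Int) (s : Int),
      (∀ k : Nat, P (s + k)
          = (((models.zip available)[k]?.map (fun p => p.2 == 1 && g p.1)).getD false)) →
      ((PySem.List.enumerate models s).filter (fun p => P p.1)).map (fun p => p.2)
        = ((models.zip available).filter (fun p => p.2 == 1 && g p.1)).map Prod.fst := by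
  intro models
  induction models with
  | nil => intro available s _; simp [PySem.List.enumerate_nil]
  | cons m ms ih =>
    intro available s hP
    cases available with
    | nil =>
      rw [enum_filter_nil P (m :: ms) s (fun k => by simpa using hP k)]
      simp
    | cons a as =>
      rw [PySem.List.enumerate_cons, List.zip_cons_cons, List.filter_cons, List.filter_cons]
      have h0 : P s = (a == 1 && g m) := by simpa using hP 0
      have hrest := ih as (s + 1) (fun k => by
        have := hP (k + 1)
        rw [show s + ((k : Nat) + 1 : Nat) = (s + 1) + (k : Nat) by push_cast; ring] at this
        simpa using this)
      by_cases hc : (a == 1 && g m) = true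
      · simp only [h0, hc, if_true, List.map_cons, hrest]
      · simp only [h0, hc, Bool.false_eq_true, if_false, hrest]

-- the pointwise description holds for the hits set
theorem hits_contains_eq (models : List String) (available : List Int)
    (manufacturers : List String) (k : Nat) :
    PySem.Set.contains (pvHits models available manufacturers) ((0 : Int) + (k : Nat))
      = (((models.zip available)[k]?.map
          (fun p => p.2 == 1 && manufacturers.any (fun f => PySem.Str.isIn f p.1))).getD false) := by
  rw [Bool.eq_iff_iff, PySem.Set.contains_iff, hits_iff]
  by_cases hk : k < (models.zip available).length
  · rw [List.getElem?_eq_getElem hk]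
    simp only [Option.map_some, Option.getD_some, zero_add, Bool.and_eq_true]
    constructor
    · rintro ⟨k', hk', hkk, h1, hany⟩
      have : k = k' := by exact_mod_cast hkk
      subst this
      exact ⟨h1, hany⟩
    · rintro ⟨h1, hany⟩
      exact ⟨k, hk, rfl, h1, hany⟩
  · rw [List.getElem?_eq_none (by omega)]
    simp only [Option.map_none, Option.getD_none, zero_add, Bool.false_eq_true, iff_false]
    rintro ⟨k', hk', hkk, -, -⟩
    have : k = k' := by exact_mod_cast hkk
    omega

-- ===== VERDICT (by name: the statement is the Claim_ definition above) =====
theorem solve_spec : Claim_equal_solve := by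
  intro models available manufacturers _
  show solve models available manufacturers = solve_alt models available manufacturers
  unfold solve solve_alt
  rw [solve_fold_inv, final_fold_inv, final_shape
    (fun m => manufacturers.any (fun f => PySem.Str.isIn f m))
    (fun i => PySem.Set.contains (pvHits models available manufacturers) i)
    models available 0 (fun k => hits_contains_eq models available manufacturers k)]
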